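-- pv_equiv track=rewrite | github.com/MatiCava/Parseo2022Flecha | src/AST.py | parseListString
-- ===== SOURCE A (Python) =====
-- def caracterEspecial(char):
--     character = list(char)[1]
--     if character == "t":
--         parsed = 9
--     elif character == 'r':
--         parsed = 13
--     elif character == 'n':
--         parsed = 10
--     else:
--         parsed = ord(character)
--     return parsed
--
-- def parseListString(str):
--     res = []
--     if len(str) == 1:
--         res.append(ord(str))
--     else:
--         esComentario = False
--         listString = list(str)[1:-1]
--         for ch in listString:
--             if esComentario:
--                 res.append(caracterEspecial(f'\\{ch}'))
--                 esComentario = False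
--             elif ch == '\\':
--                 esComentario = True
--             else:
--                 res.append(ord(ch))
--                 esComentario = False
--     return res
-- ===== SOURCE B (Python) =====
-- def _procRest(segs):
--     # segments after the first one; each is implicitly preceded by a backslash
--     if not segs:
--         return []
--     s, rest = segs[0], segs[1:]
--     if s:
--         head = {'t': 9, 'r': 13, 'n': 10}.get(s[0], ord(s[0]))
--         return [head] + [ord(c) for c in s[1:]] + _procRest(rest)
--     if rest:  # empty segment = escaped backslash; next segment is plain
--         return [92] + [ord(c) for c in rest[0]] + _procRest(rest[1:])
--     return []  # lone trailing backslash: dropped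
--
-- def parseListString(str):
--     if len(str) == 1:
--         return [ord(str)]
--     first, *rest = str[1:-1].split('\\')
--     return [ord(c) for c in first] + _procRest(rest)
-- ===== Notes on version B (the rewrite author's own statement) =====
-- stated objective: alternative
-- what changed: Replaced A's single-pass boolean escape-flag state machine over characters by a two-stage approach: split the quote-stripped string on backslash, emit the first segment's char codes verbatim, then recurse over the remaining segments (nonempty segment = escaped first char then plain tail; empty segment = escaped backslash consuming the next segment as plain; trailing empty segment = dropped lone backslash).
import Mathlib
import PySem

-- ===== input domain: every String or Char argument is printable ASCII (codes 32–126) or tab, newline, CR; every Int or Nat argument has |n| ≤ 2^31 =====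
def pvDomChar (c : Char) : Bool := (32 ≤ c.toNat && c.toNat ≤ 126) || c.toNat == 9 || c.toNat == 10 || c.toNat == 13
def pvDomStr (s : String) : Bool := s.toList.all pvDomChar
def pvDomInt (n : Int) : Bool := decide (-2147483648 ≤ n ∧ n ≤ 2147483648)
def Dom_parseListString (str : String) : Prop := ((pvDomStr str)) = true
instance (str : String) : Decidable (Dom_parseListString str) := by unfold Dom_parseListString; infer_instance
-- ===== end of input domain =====

-- B replaces A's character-level escape-flag state machine by a two-stage pass:
-- split the inner string on backslash, then process the segment list (objective: alternative).

-- ===== PORT A =====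
def caracterEspecial (char : String) : Int :=
  match PySem.List.pyGet? char.toList 1 with
  | none => 0  -- unreachable: A only calls this with a two-character string
  | some character =>
    if character = 't' then 9
    else if character = 'r' then 13
    else if character = 'n' then 10
    else (character.toNat : Int)

def parseListString (str : String) : List Int :=
  if str.toList.length = 1 then [((str.toList.headI).toNat : Int)]
  else
    let listString := PySem.List.slice str.toList (some 1) (some (-1))
    let st := listString.foldl (fun (st : List Int × Bool) ch =>
      if st.2 then (st.1 ++ [caracterEspecial (String.ofList ['\\', ch])], false)
      else if ch = '\\' then (st.1, true)
      else (st.1 ++ [(ch.toNat : Int)], false)) ([], false)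
    st.1

-- ===== PORT B =====
-- hand port of Python's s.split('\\'): exact for a single-character separator
def splitBS : List Char → List (List Char)
  | [] => [[]]
  | c :: rest =>
    if c = '\\' then [] :: splitBS rest
    else
      match splitBS rest with
      | [] => [[c]]  -- unreachable: splitBS never returns []
      | s :: ss => (c :: s) :: ss

def ordsOf (s : List Char) : List Int := s.map (fun c => (c.toNat : Int))

-- the {'t':9,'r':13,'n':10}.get(d, ord(d)) lookup, ported as the corresponding case chain
def escGet (d : Char) : Int :=
  if d = 't' then 9 else if d = 'r' then 13 else if d = 'n' then 10 else (d.toNat : Int)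

def procRest : List (List Char) → List Int
  | [] => []
  | s :: rest =>
    match s with
    | d :: tl => escGet d :: ordsOf tl ++ procRest rest
    | [] =>
      match rest with
      | r :: rs => 92 :: ordsOf r ++ procRest rs
      | [] => []

def parseListString_alt (str : String) : List Int :=
  if str.toList.length = 1 then [((str.toList.headI).toNat : Int)]
  else
    match splitBS (PySem.List.slice str.toList (some 1) (some (-1))) with
    | [] => []  -- unreachable
    | first :: rest => ordsOf first ++ procRest rest

-- ===== PRECONDITION & SPEC =====
def Spec_parseListString (str : String) (out : List Int) : Prop := out = parseListString_alt str
instance (str : String) (out : List Int) : Decidable (Spec_parseListString str out) := by unfold Spec_parseListString; infer_instance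

-- ===== CLAIM (what is proved, stated in full; the proofs are below) =====
def Claim_equal_parseListString : Prop := ∀ (str : String), Dom_parseListString str → Spec_parseListString str (parseListString str)

-- ===== LEMMAS AND PROOFS =====

-- reference: what the escape grammar denotes on the inner character list
def specChars : List Char → List Int
  | [] => []
  | '\\' :: rest =>
    match rest with
    | [] => []
    | d :: rest' => escGet d :: specChars rest'
  | c :: rest => (c.toNat : Int) :: specChars rest

lemma caracterEspecial_eq (d : Char) :
    caracterEspecial (String.ofList ['\\', d]) = escGet d := by
  simp [caracterEspecial, escGet, PySem.List.pyGet?, PySem.List.pyIdx?, String.toList_ofList]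

-- A's foldl with flag equals specChars (flag=false) / escGet-head (flag=true)
lemma foldA_spec (l : List Char) : ∀ (res : List Int),
    ((l.foldl (fun (st : List Int × Bool) ch =>
      if st.2 then (st.1 ++ [caracterEspecial (String.ofList ['\\', ch])], false)
      else if ch = '\\' then (st.1, true)
      else (st.1 ++ [(ch.toNat : Int)], false)) (res, false)).1 = res ++ specChars l)
    ∧ ((l.foldl (fun (st : List Int × Bool) ch =>
      if st.2 then (st.1 ++ [caracterEspecial (String.ofList ['\\', ch])], false)
      else if ch = '\\' then (st.1, true)
      else (st.1 ++ [(ch.toNat : Int)], false)) (res, true)).1 = res ++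
        (match l with | [] => [] | d :: rest => escGet d :: specChars rest)) := by
  induction l with
  | nil => intro res; simp [specChars]
  | cons c rest ih =>
    intro res
    constructor
    · by_cases hc : c = '\\'
      · subst hc
        simp only [List.foldl_cons]
        norm_num
        rw [(ih res).2]
        cases rest with
        | nil => simp [specChars]
        | cons d rest' => simp [specChars]
      · simp only [List.foldl_cons]
        norm_num [hc]
        rw [(ih (res ++ [(c.toNat : Int)])).1]
        rw [specChars]
        · simp
        · exact hc
    · simp only [List.foldl_cons]
      norm_num
      rw [(ih (res ++ [caracterEspecial (String.ofList ['\\', c])])).1, caracterEspecial_eq]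
      simp

lemma splitBS_ne_nil (l : List Char) : splitBS l ≠ [] := by
  cases l with
  | nil => simp [splitBS]
  | cons c rest =>
    rw [splitBS]
    by_cases hc : c = '\\'
    · simp [hc]
    · rw [if_neg hc]
      cases h : splitBS rest <;> simp

-- B's staged computation equals specChars
lemma segs_spec (l : List Char) :
    (match splitBS l with
     | [] => []
     | first :: rest => ordsOf first ++ procRest rest) = specChars l := by
  match l with
  | [] => simp [splitBS, ordsOf, procRest, specChars]
  | c :: rest =>
    by_cases hc : c = '\\'
    · subst hc
      rw [splitBS, if_pos rfl]
      match rest with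
      | [] => simp [splitBS, procRest, specChars, ordsOf]
      | d :: tl =>
        by_cases hd : d = '\\'
        · subst hd
          rw [splitBS, if_pos rfl]
          have h := segs_spec tl
          rcases hs : splitBS tl with _ | ⟨s, ss⟩
          · exact absurd hs (splitBS_ne_nil tl)
          · rw [hs] at h
            simp only [procRest, ordsOf, specChars, escGet]
            simp only [ordsOf] at h
            simp [h]
        · rw [splitBS, if_neg hd]
          have h := segs_spec tl
          rcases hs : splitBS tl with _ | ⟨s, ss⟩
          · exact absurd hs (splitBS_ne_nil tl)
          · rw [hs] at h
            simp only [procRest, ordsOf]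
            rw [specChars]
            simp only [ordsOf] at h
            simp [h]
    · rw [splitBS, if_neg hc]
      have h := segs_spec rest
      rcases hs : splitBS rest with _ | ⟨s, ss⟩
      · exact absurd hs (splitBS_ne_nil rest)
      · rw [hs] at h
        simp only [ordsOf, List.map_cons]
        rw [specChars]
        · simp only [ordsOf] at h; simp [h]
        · exact hc
termination_by l.length

-- ===== VERDICT (by name: the statement is the Claim_ definition above) =====
theorem parseListString_spec : Claim_equal_parseListString := by
  intro str _
  unfold Spec_parseListString parseListString parseListString_alt
  by_cases h1 : str.toList.length = 1
  · simp [h1]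
  · simp only [if_neg h1]
    rw [(foldA_spec _ []).1, segs_spec]
    simp
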